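-- pv_equiv track=rewrite | github.com/mflyn/lottery | src/core/analyzers/base_analyzer.py | calculate_missing_values
-- ===== SOURCE A (Python) =====
-- from typing import Dict, List, Optional, Any
--
-- def calculate_missing_values(numbers_list: List[List[int]], number_range: tuple) -> Dict[int, int]:
--     """计算号码遗漏值
--
--     Args:
--         numbers_list: 号码列表的列表
--         number_range: 号码范围
--
--     Returns:
--         遗漏值字典
--     """
--     missing_values = {}
--
--     for num in range(number_range[0], number_range[1] + 1):
--         missing_count = 0
--         for numbers in reversed(numbers_list):  # 从最新开始
--             if num in numbers:
--                 break
--             missing_count += 1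
--         missing_values[num] = missing_count
--
--     return missing_values
-- ===== SOURCE B (Python) =====
-- def calculate_missing_values(numbers_list, number_range):
--     # One reverse pass with early exit: record each range number's
--     # first-occurrence index (from the newest draw); stop as soon as every
--     # number in the range has been seen. Unseen numbers default to the
--     # total number of draws.
--     total = len(numbers_list)
--     remaining = set(range(number_range[0], number_range[1] + 1))
--     first_seen = {}
--     i = 0
--     for numbers in reversed(numbers_list):
--         if not remaining:
--             break
--         for n in numbers:
--             if n in remaining:
--                 first_seen[n] = i
--                 remaining.discard(n)
--         i += 1
--     return {num: first_seen.get(num, total)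
--             for num in range(number_range[0], number_range[1] + 1)}
-- ===== Notes on version B (the rewrite author's own statement) =====
-- stated objective: alternative
-- what changed: Replaces A's per-number rescan of the draw list with a single reverse pass (with early exit once every range number was seen) that records each number's first-occurrence index in a dict, then answers each range query by a lookup.
import Mathlib
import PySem

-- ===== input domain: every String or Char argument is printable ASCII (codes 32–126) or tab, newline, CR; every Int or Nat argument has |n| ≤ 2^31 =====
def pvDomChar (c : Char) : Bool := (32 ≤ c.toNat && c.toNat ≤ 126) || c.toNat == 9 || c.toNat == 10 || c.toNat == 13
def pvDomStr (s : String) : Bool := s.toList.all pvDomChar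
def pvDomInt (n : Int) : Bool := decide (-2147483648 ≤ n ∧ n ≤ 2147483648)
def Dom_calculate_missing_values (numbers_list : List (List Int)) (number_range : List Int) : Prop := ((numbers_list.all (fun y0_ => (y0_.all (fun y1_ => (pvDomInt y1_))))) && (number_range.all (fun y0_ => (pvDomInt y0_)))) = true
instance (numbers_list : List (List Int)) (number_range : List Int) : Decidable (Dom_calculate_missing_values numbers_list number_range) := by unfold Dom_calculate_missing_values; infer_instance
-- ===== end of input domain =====

-- B replaces A's per-number rescan of all draws with one reverse pass (with early
-- exit once every range number was seen) recording first-occurrence indices in a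
-- dict (objective: alternative single-pass algorithm).


-- ===== PORT A =====
-- inner loop of A: scan reversed draws, break on the first draw containing num,
-- counting the draws passed over
def aMissCount (num : Int) : List (List Int) → Int
  | [] => 0
  | ns :: rest => if ns.contains num then 0 else 1 + aMissCount num rest

def calculate_missing_values (numbers_list : List (List Int)) (number_range : List Int) : List (Int × Int) :=
  match PySem.List.pyGet? number_range 0, PySem.List.pyGet? number_range 1 with
  | some lo, some hi =>
    ((PySem.List.pyRange lo (hi + 1) 1).foldl
      (fun (mv : PySem.Dict Int Int) num => mv.insert num (aMissCount num numbers_list.reverse))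
      PySem.Dict.empty).items
  | _, _ => []   -- number_range shorter than 2: Python raises IndexError (excluded by Pre_)

-- ===== PORT B =====
-- B's loop over the reversed draws: i = running index, st = (first_seen, remaining);
-- breaks when remaining is empty
def bLoop (i : Int) (draws : List (List Int)) (st : PySem.Dict Int Int × PySem.Set Int) :
    PySem.Dict Int Int :=
  match draws with
  | [] => st.1
  | ns :: rest =>
    if st.2.isEmpty then st.1
    else bLoop (i + 1) rest
      (ns.foldl
        (fun st n =>
          if PySem.Set.contains st.2 n then (st.1.insert n i, PySem.Set.discard st.2 n) else st)
        st)

def calculate_missing_values_alt (numbers_list : List (List Int)) (number_range : List Int) : List (Int × Int) :=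
  match PySem.List.pyGet? number_range 0 with
  | none => []   -- number_range shorter than 1: Python raises IndexError (excluded by Pre_)
  | some lo =>
    match PySem.List.pyGet? number_range 1 with
    | none => []   -- number_range shorter than 2: Python raises IndexError (excluded by Pre_)
    | some hi =>
      let total : Int := numbers_list.length
      let remaining := PySem.Set.ofList (PySem.List.pyRange lo (hi + 1) 1)
      let first_seen := bLoop 0 numbers_list.reverse (PySem.Dict.empty, remaining)
      ((PySem.List.pyRange lo (hi + 1) 1).foldl
        (fun (mv : PySem.Dict Int Int) num => mv.insert num (first_seen.getD num total))
        PySem.Dict.empty).items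

-- ===== PRECONDITION & SPEC =====
-- Pre_ excludes only number_range with fewer than 2 elements, where A raises IndexError.
def Pre_calculate_missing_values (numbers_list : List (List Int)) (number_range : List Int) : Prop :=
  2 ≤ number_range.length
instance (numbers_list : List (List Int)) (number_range : List Int) : Decidable (Pre_calculate_missing_values numbers_list number_range) := by unfold Pre_calculate_missing_values; infer_instance

def pvWitness_calculate_missing_values : List (List Int) × List Int := ([[1, 2], [3]], [1, 3])

def Spec_calculate_missing_values (numbers_list : List (List Int)) (number_range : List Int) (out : List (Int × Int)) : Prop := out = calculate_missing_values_alt numbers_list number_range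
instance (numbers_list : List (List Int)) (number_range : List Int) (out : List (Int × Int)) : Decidable (Spec_calculate_missing_values numbers_list number_range out) := by unfold Spec_calculate_missing_values; infer_instance

-- ===== CLAIM (what is proved, stated in full; the proofs are below) =====
def Claim_equal_calculate_missing_values : Prop := ∀ (numbers_list : List (List Int)) (number_range : List Int), Dom_calculate_missing_values numbers_list number_range → Pre_calculate_missing_values numbers_list number_range → Spec_calculate_missing_values numbers_list number_range (calculate_missing_values numbers_list number_range)

-- ===== LEMMAS AND PROOFS =====

-- index (from the front) of the first draw containing num, if any
def aFirst (num : Int) : List (List Int) → Option Int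
  | [] => none
  | ns :: rest => if ns.contains num then some 0 else (aFirst num rest).map (· + 1)
theorem aMissCount_eq_aFirst (num : Int) (L : List (List Int)) :
    aMissCount num L = match aFirst num L with
                       | some k => k
                       | none => (L.length : Int) := by
  induction L with
  | nil => simp [aMissCount, aFirst]
  | cons ns rest ih =>
    by_cases h : num ∈ ns
    · simp [aMissCount, aFirst, h]
    · simp only [aMissCount, aFirst, List.contains_eq_mem, h, decide_false,
        Bool.false_eq_true, if_false, ih]
      cases aFirst num rest <;> simp <;> push_cast <;> ring
theorem bInner_snd (i : Int) (ns : List Int) (st : PySem.Dict Int Int × PySem.Set Int) (num : Int) :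
    (num ∈ (ns.foldl
        (fun st n =>
          if PySem.Set.contains st.2 n then (st.1.insert n i, PySem.Set.discard st.2 n) else st)
        st).2) ↔ (num ∈ st.2 ∧ num ∉ ns) := by
  induction ns generalizing st with
  | nil => simp
  | cons n ns ih =>
    simp only [List.foldl_cons]
    by_cases hc : n ∈ st.2
    · rw [ih]
      simp only [PySem.Set.contains_eq_listContains]
      simp [hc, PySem.Set.mem_discard, List.mem_cons]
      tauto
    · rw [ih]
      simp only [PySem.Set.contains_eq_listContains]
      simp only [List.contains_eq_mem, hc, decide_false, Bool.false_eq_true, if_false,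
        List.mem_cons]
      constructor
      · rintro ⟨h1, h2⟩; exact ⟨h1, fun h => h.elim (by rintro rfl; exact hc h1) h2⟩
      · rintro ⟨h1, h2⟩; exact ⟨h1, fun h => h2 (Or.inr h)⟩
theorem bInner_fst (i : Int) (ns : List Int) (st : PySem.Dict Int Int × PySem.Set Int) (num : Int) :
    ((ns.foldl
        (fun st n =>
          if PySem.Set.contains st.2 n then (st.1.insert n i, PySem.Set.discard st.2 n) else st)
        st).1).get? num = if num ∈ st.2 ∧ num ∈ ns then some i else st.1.get? num := by
  induction ns generalizing st with
  | nil => simp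
  | cons n ns ih =>
    simp only [List.foldl_cons]
    by_cases hc : n ∈ st.2
    · rw [ih]
      simp only [PySem.Set.contains_eq_listContains]
      by_cases hn : num = n
      · subst hn
        simp [PySem.Set.mem_discard, hc, PySem.Dict.get?_insert_self, List.mem_cons]
      · simp only [List.contains_eq_mem, hc, decide_true, if_true,
          PySem.Set.mem_discard, PySem.Dict.get?_insert_of_ne _ _ hn, List.mem_cons]
        have hiff : ((num ∈ st.2 ∧ num ≠ n) ∧ num ∈ ns) ↔ (num ∈ st.2 ∧ (num = n ∨ num ∈ ns)) := by
          tauto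
        simp only [hiff]
    · rw [ih]
      simp only [PySem.Set.contains_eq_listContains]
      simp only [List.contains_eq_mem, hc, decide_false, Bool.false_eq_true, if_false,
        List.mem_cons]
      have hiff : (num ∈ st.2 ∧ (num = n ∨ num ∈ ns)) ↔ (num ∈ st.2 ∧ num ∈ ns) := by
        constructor
        · rintro ⟨hm, rfl | hmm⟩
          · exact absurd hm hc
          · exact ⟨hm, hmm⟩
        · exact fun h => ⟨h.1, Or.inr h.2⟩
      simp only [hiff]
theorem bLoop_get? (L : List (List Int)) (st : PySem.Dict Int Int × PySem.Set Int) (i num : Int) :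
    (bLoop i L st).get? num =
      if num ∈ st.2 then
        (match aFirst num L with
         | some k => some (i + k)
         | none => st.1.get? num)
      else st.1.get? num := by
  induction L generalizing st i with
  | nil =>
    simp only [bLoop, aFirst]
    split_ifs <;> rfl
  | cons ns L ih =>
    simp only [bLoop]
    by_cases he : st.2.isEmpty = true
    · have hnm : num ∉ st.2 := by
        rw [List.isEmpty_iff] at he; simp [he]
      simp [he, hnm]
    · simp only [he, Bool.false_eq_true, if_false]
      rw [ih]
      simp only [bInner_snd i, bInner_fst i]
      by_cases hmem : num ∈ st.2
      · by_cases hns : num ∈ ns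
        · have hcont : ns.contains num = true := by simp [hns]
          simp [aFirst, hcont, hmem, hns]
        · have hcont : ns.contains num = false := by simp [hns]
          simp only [aFirst, hcont, Bool.false_eq_true, if_false, hmem, hns,
            not_false_iff, and_true, and_false, if_true, if_false, true_and]
          cases hf : aFirst num L with
          | some k => simp only [Option.map_some]; congr 1; ring
          | none => simp
      · simp [hmem]
theorem value_eq (numbers_list : List (List Int)) (lo hi num : Int)
    (h : num ∈ PySem.List.pyRange lo (hi + 1) 1) :
    (bLoop 0 numbers_list.reverse
        (PySem.Dict.empty, PySem.Set.ofList (PySem.List.pyRange lo (hi + 1) 1))).getD num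
        (numbers_list.length : Int) =
      aMissCount num numbers_list.reverse := by
  rw [PySem.Dict.getD_eq_get?_getD, bLoop_get?]
  have hmem : num ∈ PySem.Set.ofList (PySem.List.pyRange lo (hi + 1) 1) := by
    rw [PySem.Set.mem_ofList]; exact h
  simp only [hmem, if_true]
  rw [aMissCount_eq_aFirst]
  cases hf : aFirst num numbers_list.reverse with
  | some k => simp
  | none => simp [PySem.Dict.get?_empty, List.length_reverse]

-- ===== VERDICT (by name: the statement is the Claim_ definition above) =====
theorem calculate_missing_values_spec : Claim_equal_calculate_missing_values := by
  intro numbers_list number_range _ _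
  unfold Spec_calculate_missing_values calculate_missing_values calculate_missing_values_alt
  cases h0 : PySem.List.pyGet? number_range 0 with
  | none => rfl
  | some lo =>
    cases h1 : PySem.List.pyGet? number_range 1 with
    | none => rfl
    | some hi =>
      simp only []
      congr 1
      refine PySem.List.foldl_congr_mem _ _ _ _ (fun acc num hmem => ?_)
      rw [value_eq numbers_list lo hi num hmem]
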